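-- pv_equiv track=rewrite | github.com/Durgaprasad-kakarla/Geeks-for-Geeks | Medium/Buy Maximum Stocks if i stocks can be bought on i-th day/buy-maximum-stocks-if-i-stocks-can-be-bought-on-ith-day.py | buyMaximumProducts
-- ===== SOURCE A (Python) =====
-- import heapq
-- from typing import List
--
-- def buyMaximumProducts(n : int, k : int, price : List[int]) -> int:
--     heap=[]
--     for i in range(n):
--         heapq.heappush(heap,[price[i],i+1])
--     tot=0
--     while heap:
--         x=heapq.heappop(heap)
--         ele=x[0]
--         cnt=x[1]
--         if k-ele*cnt>=0:
--             k-=ele*cnt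
--             tot+=cnt
--         else:
--             tot+=(k//ele)
--             return tot
--     return tot
-- ===== SOURCE B (Python) =====
-- def buyMaximumProducts(n, k, price):
--     pairs = sorted((price[i], i + 1) for i in range(n))
--     cost = [0]
--     days = [0]
--     for p, c in pairs:
--         cost.append(cost[-1] + p * c)
--         days.append(days[-1] + c)
--     m = next((i for i in range(len(pairs)) if cost[i + 1] > k), len(pairs))
--     if m == len(pairs):
--         return days[m]
--     return days[m] + (k - cost[m]) // pairs[m][0]
-- ===== Notes on version B (the rewrite author's own statement) =====
-- stated objective: alternative
-- what changed: Replaces A's heap-drain greedy with a running budget and a branch per pop by a staged table computation: sort the (price, day) pairs once, build prefix-sum tables of cumulative cost and cumulative stock count, locate the first prefix whose cost exceeds the budget, and read the answer off the tables plus one closed-form partial-buy term.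
-- outside the precondition, e.g. on buyMaximumProducts(2, -1, [-5, 0]): A returns 3, B returns 3
import Mathlib
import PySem

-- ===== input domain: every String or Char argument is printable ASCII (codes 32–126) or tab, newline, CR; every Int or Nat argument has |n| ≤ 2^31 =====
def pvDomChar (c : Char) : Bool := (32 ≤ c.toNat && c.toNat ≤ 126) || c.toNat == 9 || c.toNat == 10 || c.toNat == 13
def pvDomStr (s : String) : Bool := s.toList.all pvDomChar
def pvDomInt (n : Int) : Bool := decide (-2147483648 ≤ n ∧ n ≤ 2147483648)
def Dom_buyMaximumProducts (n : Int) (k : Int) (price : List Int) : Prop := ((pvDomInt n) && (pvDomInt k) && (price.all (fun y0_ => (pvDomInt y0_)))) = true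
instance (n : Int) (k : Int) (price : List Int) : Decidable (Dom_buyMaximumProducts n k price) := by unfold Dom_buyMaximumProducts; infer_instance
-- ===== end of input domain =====

-- B replaces A's heap greedy (running budget, branch per pop) by two staged passes: sort, build the
-- prefix-sum tables of cost and stock count, locate the first unaffordable prefix, and read the
-- answer off the tables with one closed-form partial-buy term (objective: alternative).

-- ===== PORT A =====
-- Python's `[price[i], i+1] < [q, j]` is the lexicographic comparison of int pairs:
def pvLt (a b : Int × Int) : Bool :=
  decide (a.1 < b.1) || (!decide (b.1 < a.1) && decide (a.2 < b.2))

-- heapq is ported by its contract: heappop returns the least element of the container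
-- (exact here: the pushed pairs have pairwise distinct second components, so the minimum is unique).
def pvPopMin : (Int × Int) → List (Int × Int) → (Int × Int) × List (Int × Int)
  | x, [] => (x, [])
  | x, y :: ys =>
    let m := pvPopMin y ys
    if pvLt m.1 x then (m.1, x :: m.2) else (x, y :: ys)

-- needed by pvDrain's termination proof
theorem pvPopMin_length (x : Int × Int) (xs : List (Int × Int)) :
    (pvPopMin x xs).2.length = xs.length := by
  induction xs generalizing x with
  | nil => simp [pvPopMin]
  | cons y ys ih => simp only [pvPopMin]; split <;> simp [ih]

-- A's `while heap:` loop: pop the minimum, buy fully or partially.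
def pvDrain : List (Int × Int) → Int → Int → Int
  | [], _, tot => tot
  | x :: xs, k, tot =>
    let m := pvPopMin x xs
    if 0 ≤ k - m.1.1 * m.1.2 then pvDrain m.2 (k - m.1.1 * m.1.2) (tot + m.1.2)
    else tot + PySem.Int.floordiv k m.1.1
  termination_by l => l.length
  decreasing_by simp [pvPopMin_length]

def buyMaximumProducts (n : Int) (k : Int) (price : List Int) : Int :=
  -- `for i in range(n): heappush(heap, [price[i], i+1])` (index in range guaranteed by Pre_)
  let heap := (PySem.List.pyRange 0 n 1).foldl
    (fun h i => h ++ [((PySem.List.pyGet? price i).getD 0, i + 1)]) []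
  pvDrain heap k 0

-- ===== PORT B =====
-- the `for p, c in pairs:` loop appending to cost and days (`cost[-1]` = last element)
def pvBuild : List (Int × Int) → List Int → List Int → List Int × List Int
  | [], cost, days => (cost, days)
  | (p, c) :: t, cost, days =>
    pvBuild t (cost ++ [(PySem.List.pyGetD cost (-1) 0) + p * c])
              (days ++ [(PySem.List.pyGetD days (-1) 0) + c])

-- `next((i for i in range(len(pairs)) if cost[i+1] > k), len(pairs))`, scanning cost[1:]
def pvFind : List Int → Int → Nat
  | [], _ => 0
  | c :: t, k => if k < c then 0 else 1 + pvFind t k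

def buyMaximumProducts_alt (n : Int) (k : Int) (price : List Int) : Int :=
  let pairs := (PySem.List.pyRange 0 n 1).map
    (fun i => ((PySem.List.pyGet? price i).getD 0, i + 1))
  let s := PySem.List.sorted2 pairs (fun x => x.1) (fun x => x.2)
  let cd := pvBuild s [0] [0]
  let m := pvFind (cd.1.drop 1) k
  if m = s.length then PySem.List.pyGetD cd.2 (m : Int) 0
  else PySem.List.pyGetD cd.2 (m : Int) 0
    + PySem.Int.floordiv (k - PySem.List.pyGetD cd.1 (m : Int) 0)
        (PySem.List.pyGetD s (m : Int) (0, 0)).1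

-- ===== PRECONDITION & SPEC =====
-- Pre_ excludes n > len(price) (A raises IndexError) and k < 0 with a 0 among the first n prices
-- (A can raise ZeroDivisionError on `k // 0` there).
def Pre_buyMaximumProducts (n : Int) (k : Int) (price : List Int) : Prop :=
  n ≤ (price.length : Int) ∧ (0 ≤ k ∨ ¬ (0 : Int) ∈ price.take n.toNat)
instance (n : Int) (k : Int) (price : List Int) : Decidable (Pre_buyMaximumProducts n k price) := by
  unfold Pre_buyMaximumProducts; infer_instance

def pvWitness_buyMaximumProducts : Int × Int × List Int := (3, 10, [2, 3, 1])

def Spec_buyMaximumProducts (n : Int) (k : Int) (price : List Int) (out : Int) : Prop :=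
  out = buyMaximumProducts_alt n k price
instance (n : Int) (k : Int) (price : List Int) (out : Int) :
    Decidable (Spec_buyMaximumProducts n k price out) := by
  unfold Spec_buyMaximumProducts; infer_instance

-- ===== CLAIM (what is proved, stated in full; the proofs are below) =====
def Claim_equal_buyMaximumProducts : Prop := ∀ (n : Int) (k : Int) (price : List Int), Dom_buyMaximumProducts n k price → Pre_buyMaximumProducts n k price → Spec_buyMaximumProducts n k price (buyMaximumProducts n k price)

-- ===== LEMMAS AND PROOFS =====

-- proof-side intermediate: A's greedy over an already-sorted list
def pvScan : List (Int × Int) → Int → Int → Int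
  | [], _, tot => tot
  | (p, c) :: t, k, tot =>
    if 0 ≤ k - p * c then pvScan t (k - p * c) (tot + c)
    else tot + PySem.Int.floordiv k p

-- r is the lexicographic ≤ on pairs, phrased as "not strictly greater".
def pvR (a b : Int × Int) : Prop := pvLt b a = false

theorem pvLt_false_iff (a b : Int × Int) :
    pvLt a b = false ↔ b.1 < a.1 ∨ (a.1 = b.1 ∧ b.2 ≤ a.2) := by
  simp [pvLt]; omega

theorem pvR_of_lt {a b : Int × Int} (h : pvLt a b = true) : pvR a b := by
  simp only [pvR, pvLt_false_iff]
  simp only [pvLt, Bool.or_eq_true, Bool.and_eq_true, Bool.not_eq_true', decide_eq_true_eq,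
    decide_eq_false_iff_not] at h
  omega

theorem pvR_of_not_lt {a b : Int × Int} (h : pvLt a b = false) : pvR b a := h

theorem pvR_trans {a b c : Int × Int} (h1 : pvR a b) (h2 : pvR b c) : pvR a c := by
  simp only [pvR, pvLt_false_iff] at *; omega

theorem pvR_antisymm {a b : Int × Int} (h1 : pvR a b) (h2 : pvR b a) : a = b := by
  simp only [pvR, pvLt_false_iff] at *
  have : a.1 = b.1 ∧ a.2 = b.2 := by omega
  exact Prod.ext this.1 this.2

theorem pvR_refl (a : Int × Int) : pvR a a := by
  simp [pvR, pvLt]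

theorem pvPopMin_perm (x : Int × Int) (xs : List (Int × Int)) :
    ((pvPopMin x xs).1 :: (pvPopMin x xs).2).Perm (x :: xs) := by
  induction xs generalizing x with
  | nil => simp [pvPopMin]
  | cons y ys ih =>
    simp only [pvPopMin]
    split
    · exact (List.Perm.swap x (pvPopMin y ys).1 (pvPopMin y ys).2).trans ((ih y).cons x)
    · exact List.Perm.refl _

theorem pvPopMin_min (x : Int × Int) (xs : List (Int × Int)) :
    ∀ y ∈ x :: xs, pvR (pvPopMin x xs).1 y := by
  induction xs generalizing x with
  | nil => intro y hy; simp [pvPopMin] at hy ⊢; subst hy; exact pvR_refl _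
  | cons z zs ih =>
    intro y hy
    simp only [pvPopMin]
    split
    · rename_i hlt
      rcases List.mem_cons.1 hy with rfl | hy'
      · exact pvR_of_lt hlt
      · exact ih z y hy'
    · rename_i hnlt
      rcases List.mem_cons.1 hy with rfl | hy'
      · exact pvR_refl y
      · exact pvR_trans (pvR_of_not_lt (Bool.eq_false_iff.2 hnlt)) (ih z y hy')

-- PySem.List.sorted2 with fst/snd keys is exactly insertion sort by pvLt
theorem sorted2_eq_foldl (l : List (Int × Int)) :
    PySem.List.sorted2 l (fun x => x.1) (fun x => x.2)
      = l.foldl (fun acc x => PySem.List.insertBy pvLt x acc) [] := rfl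

theorem insertBy_pairwise (x : Int × Int) (ys : List (Int × Int))
    (h : ys.Pairwise pvR) : (PySem.List.insertBy pvLt x ys).Pairwise pvR := by
  induction ys with
  | nil => simp [PySem.List.insertBy]
  | cons y t ih =>
    rw [List.pairwise_cons] at h
    simp only [PySem.List.insertBy]
    split
    · rename_i hlt
      refine List.Pairwise.cons ?_ (List.Pairwise.cons h.1 h.2)
      intro z hz
      rcases List.mem_cons.1 hz with rfl | hz'
      · exact pvR_of_lt hlt
      · exact pvR_trans (pvR_of_lt hlt) (h.1 z hz')
    · rename_i hnlt
      refine List.Pairwise.cons ?_ (ih h.2)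
      intro z hz
      rcases (PySem.List.mem_insertBy pvLt x z t).1 hz with rfl | hz'
      · exact pvR_of_not_lt (Bool.eq_false_iff.2 hnlt)
      · exact h.1 z hz'

theorem sorted2_pairwise (l : List (Int × Int)) :
    (PySem.List.sorted2 l (fun x => x.1) (fun x => x.2)).Pairwise pvR := by
  rw [sorted2_eq_foldl]
  suffices h : ∀ (l acc : List (Int × Int)), acc.Pairwise pvR →
      (l.foldl (fun acc x => PySem.List.insertBy pvLt x acc) acc).Pairwise pvR by
    exact h l [] (by simp)
  intro l
  induction l with
  | nil => intro acc h; simpa using h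
  | cons x t ih => intro acc h; exact ih _ (insertBy_pairwise x acc h)

theorem sorted2_cons_of_min (l : List (Int × Int)) (m : Int × Int) (rest : List (Int × Int))
    (hperm : (m :: rest).Perm l) (hmin : ∀ y ∈ l, pvR m y) :
    PySem.List.sorted2 l (fun x => x.1) (fun x => x.2)
      = m :: PySem.List.sorted2 rest (fun x => x.1) (fun x => x.2) := by
  apply List.Perm.eq_of_pairwise (fun a b _ _ => pvR_antisymm)
  · exact sorted2_pairwise l
  · refine List.Pairwise.cons ?_ (sorted2_pairwise rest)
    intro y hy
    have hy' : y ∈ rest := ((PySem.List.sorted2_perm rest _ _ _).mem_iff).1 hy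
    exact hmin y (hperm.mem_iff.1 (List.mem_cons_of_mem m hy'))
  · exact ((PySem.List.sorted2_perm l _ _ _).trans hperm.symm).trans
      ((PySem.List.sorted2_perm rest _ _ _).cons m).symm

theorem drain_eq_scan : ∀ (N : Nat) (l : List (Int × Int)), l.length ≤ N → ∀ (k tot : Int),
    pvDrain l k tot = pvScan (PySem.List.sorted2 l (fun x => x.1) (fun x => x.2)) k tot := by
  intro N
  induction N with
  | zero =>
    intro l hl k tot
    have : l = [] := List.eq_nil_of_length_eq_zero (Nat.le_zero.1 hl)
    subst this; simp only [pvDrain]; rfl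
  | succ N ih =>
    intro l hl k tot
    match l with
    | [] => simp only [pvDrain]; rfl
    | x :: xs =>
      have hs := sorted2_cons_of_min (x :: xs) (pvPopMin x xs).1 (pvPopMin x xs).2
        (pvPopMin_perm x xs) (pvPopMin_min x xs)
      rw [hs]
      simp only [pvDrain, pvScan]
      split
      · exact ih (pvPopMin x xs).2 (by simp only [pvPopMin_length x xs]; simpa using hl) _ _
      · rfl

-- mathematical prefix-sum sequences of cost and stock count
def pvPreC : List (Int × Int) → Int → List Int
  | [], _ => []
  | (p, c) :: t, a => (a + p * c) :: pvPreC t (a + p * c)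

def pvPreD : List (Int × Int) → Int → List Int
  | [], _ => []
  | (_, c) :: t, a => (a + c) :: pvPreD t (a + c)

theorem pvBuild_eq (l : List (Int × Int)) : ∀ (cost days : List Int) (hc : cost ≠ []) (hd : days ≠ []),
    pvBuild l cost days
      = (cost ++ pvPreC l (cost.getLast hc), days ++ pvPreD l (days.getLast hd)) := by
  induction l with
  | nil => intro cost days hc hd; simp [pvBuild, pvPreC, pvPreD]
  | cons x t ih =>
    intro cost days hc hd
    obtain ⟨p, c⟩ := x
    simp only [pvBuild, PySem.List.pyGetD_neg_one _ _ hc, PySem.List.pyGetD_neg_one _ _ hd]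
    rw [ih _ _ (by simp) (by simp)]
    simp only [pvPreC, pvPreD, List.getLast_append_singleton, List.append_assoc,
      List.singleton_append]

theorem pvPreC_shift : ∀ (l : List (Int × Int)) (a b : Int),
    pvPreC l (a + b) = (pvPreC l b).map (a + ·) := by
  intro l
  induction l with
  | nil => intro a b; simp [pvPreC]
  | cons x t ih =>
    intro a b; obtain ⟨p, c⟩ := x
    simp only [pvPreC, List.map_cons, add_assoc, ih]

theorem pvPreD_shift : ∀ (l : List (Int × Int)) (a b : Int),
    pvPreD l (a + b) = (pvPreD l b).map (a + ·) := by
  intro l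
  induction l with
  | nil => intro a b; simp [pvPreD]
  | cons x t ih =>
    intro a b; obtain ⟨p, c⟩ := x
    simp only [pvPreD, List.map_cons, add_assoc, ih]

theorem pvPreC_length (l : List (Int × Int)) (a : Int) : (pvPreC l a).length = l.length := by
  induction l generalizing a with
  | nil => simp [pvPreC]
  | cons x t ih => obtain ⟨p, c⟩ := x; simp [pvPreC, ih]

theorem pvPreD_length (l : List (Int × Int)) (a : Int) : (pvPreD l a).length = l.length := by
  induction l generalizing a with
  | nil => simp [pvPreD]
  | cons x t ih => obtain ⟨p, c⟩ := x; simp [pvPreD, ih]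

theorem pvFind_le (l : List Int) (k : Int) : pvFind l k ≤ l.length := by
  induction l with
  | nil => simp [pvFind]
  | cons c t ih =>
    simp only [pvFind]
    split
    · simp
    · simp only [List.length_cons]; omega

theorem pvFind_map (l : List Int) (a k : Int) :
    pvFind (l.map (a + ·)) k = pvFind l (k - a) := by
  induction l with
  | nil => simp [pvFind]
  | cons c t ih =>
    simp only [List.map_cons, pvFind, ih]
    have : k < a + c ↔ k - a < c := by omega
    simp [this]

theorem getD_cons_map (a : Int) (l : List Int) (m : Nat) (hm : m ≤ l.length) :
    (a :: l.map (a + ·)).getD m 0 = a + (0 :: l).getD m 0 := by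
  match m with
  | 0 => simp
  | Nat.succ j =>
    have hj : j < l.length := by omega
    simp [List.getD, hj]

theorem pvScan_tot (l : List (Int × Int)) (k tot : Int) :
    pvScan l k tot = tot + pvScan l k 0 := by
  induction l generalizing k tot with
  | nil => simp [pvScan]
  | cons x t ih =>
    obtain ⟨p, c⟩ := x
    simp only [pvScan]
    split
    · rw [ih _ (tot + c), ih _ (0 + c)]; ring
    · ring

-- B's staged tables-and-search computation, as a function of the sorted list
def pvStaged (s : List (Int × Int)) (k : Int) : Int :=
  if pvFind (pvPreC s 0) k = s.length then (0 :: pvPreD s 0).getD (pvFind (pvPreC s 0) k) 0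
  else (0 :: pvPreD s 0).getD (pvFind (pvPreC s 0) k) 0
    + PySem.Int.floordiv (k - (0 :: pvPreC s 0).getD (pvFind (pvPreC s 0) k) 0)
        (s.getD (pvFind (pvPreC s 0) k) (0, 0)).1

theorem staged_eq_scan : ∀ (s : List (Int × Int)) (k : Int), pvStaged s k = pvScan s k 0 := by
  intro s
  induction s with
  | nil => intro k; simp [pvStaged, pvFind, pvScan, pvPreC, pvPreD]
  | cons x t ih =>
    intro k
    obtain ⟨p, c⟩ := x
    have hC : pvPreC ((p, c) :: t) 0 = (p * c) :: (pvPreC t 0).map (p * c + ·) := by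
      simp only [pvPreC, zero_add]
      rw [show pvPreC t (p * c) = pvPreC t (p * c + 0) by ring_nf, pvPreC_shift]
    have hD : pvPreD ((p, c) :: t) 0 = c :: (pvPreD t 0).map (c + ·) := by
      simp only [pvPreD, zero_add]
      rw [show pvPreD t c = pvPreD t (c + 0) by ring_nf, pvPreD_shift]
    by_cases hk : 0 ≤ k - p * c
    · have hscan : pvScan ((p, c) :: t) k 0 = c + pvStaged t (k - p * c) := by
        simp only [pvScan, if_pos hk]; rw [pvScan_tot, zero_add, ih]
      rw [hscan]
      have hfind : pvFind (pvPreC ((p, c) :: t) 0) k = 1 + pvFind (pvPreC t 0) (k - p * c) := by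
        rw [hC]; simp only [pvFind, if_neg (show ¬ k < p * c by omega), pvFind_map]
      set m' := pvFind (pvPreC t 0) (k - p * c) with hm'
      have hm'le : m' ≤ t.length := by
        have h := pvFind_le (pvPreC t 0) (k - p * c); rwa [pvPreC_length] at h
      have e1 : (0 :: pvPreD ((p, c) :: t) 0).getD (1 + m') 0
          = c + (0 :: pvPreD t 0).getD m' 0 := by
        rw [hD, show 1 + m' = m' + 1 by omega, List.getD_cons_succ]
        exact getD_cons_map c (pvPreD t 0) m' (by rwa [pvPreD_length])
      have e2 : (0 :: pvPreC ((p, c) :: t) 0).getD (1 + m') 0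
          = p * c + (0 :: pvPreC t 0).getD m' 0 := by
        rw [hC, show 1 + m' = m' + 1 by omega, List.getD_cons_succ]
        exact getD_cons_map (p * c) (pvPreC t 0) m' (by rwa [pvPreC_length])
      have e3 : (((p, c) :: t).getD (1 + m') (0, 0)) = t.getD m' (0, 0) := by
        rw [show 1 + m' = m' + 1 by omega, List.getD_cons_succ]
      unfold pvStaged
      rw [hfind, e1, e2, e3]
      by_cases hm : m' = t.length
      · have h1 : 1 + m' = ((p, c) :: t).length := by simp [hm]; omega
        rw [if_pos h1, if_pos hm]
      · have h1 : ¬ (1 + m' = ((p, c) :: t).length) := by simp; omega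
        rw [if_neg h1, if_neg hm]
        have e4 : k - (p * c + (0 :: pvPreC t 0).getD m' 0)
            = k - p * c - (0 :: pvPreC t 0).getD m' 0 := by ring
        rw [e4]; ring
    · have hfind : pvFind (pvPreC ((p, c) :: t) 0) k = 0 := by
        rw [hC]; simp only [pvFind, if_pos (show k < p * c by omega)]
      have h1 : ¬ ((0 : Nat) = ((p, c) :: t).length) := by simp
      unfold pvStaged
      rw [hfind, if_neg h1]
      simp only [pvScan, if_neg hk, List.getD]
      simp

-- B's port equals pvStaged of the sorted pair list
theorem alt_eq_staged (n k : Int) (price : List Int) :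
    buyMaximumProducts_alt n k price
      = pvStaged (PySem.List.sorted2 ((PySem.List.pyRange 0 n 1).map
          (fun i => ((PySem.List.pyGet? price i).getD 0, i + 1))) (fun x => x.1) (fun x => x.2)) k := by
  simp only [buyMaximumProducts_alt]
  set s := PySem.List.sorted2 ((PySem.List.pyRange 0 n 1).map
    (fun i => ((PySem.List.pyGet? price i).getD 0, i + 1))) (fun x => x.1) (fun x => x.2) with hs
  rw [pvBuild_eq s [0] [0] (by simp) (by simp)]
  simp only [List.getLast_singleton, List.singleton_append, List.drop_succ_cons, List.drop_zero,
    PySem.List.pyGetD_natCast, pvStaged]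

-- ===== VERDICT (by name: the statement is the Claim_ definition above) =====
theorem buyMaximumProducts_spec : Claim_equal_buyMaximumProducts := by
  intro n k price _ _
  unfold Spec_buyMaximumProducts buyMaximumProducts
  rw [PySem.List.foldl_append_singleton_eq_map, List.nil_append, alt_eq_staged,
    staged_eq_scan]
  exact drain_eq_scan _ _ (Nat.le_refl _) k 0
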